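-- pv_equiv track=rewrite | github.com/MaTriXy/video-generator | video-tools/scripts/assets/emoji/react_icons_provider.py | _infer_library
-- ===== SOURCE A (Python) =====
-- def _infer_library(icon_name: str) -> str | None:
--     """
--     Infer library name from icon name.
--     React-icons uses prefixes like Fa, Md, Io, etc.
--     """
--     # Common prefix mappings
--     prefix_map = {
--         'Fa': 'fa',      # Font Awesome
--         'Md': 'md',      # Material Design
--         'Io': 'io',      # Ionicons
--         'Io5': 'io5',    # Ionicons 5
--         'Ti': 'ti',      # Typicons
--         'Go': 'go',      # Github Octicons
--         'Fi': 'fi',      # Feather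
--         'Gi': 'gi',      # Game Icons
--         'Wi': 'wi',      # Weather Icons
--         'Di': 'di',      # Devicons
--         'Ai': 'ai',      # Ant Design
--         'Bs': 'bs',      # Bootstrap
--         'Ri': 'ri',      # Remix Icons
--         'Fc': 'fc',      # Flat Color
--         'Gr': 'gr',      # Grommet
--         'Hi': 'hi',      # Hero Icons
--         'Hi2': 'hi2',    # Hero Icons 2
--         'Si': 'si',      # Simple Icons
--         'Sl': 'sl',      # Simple Line
--         'Im': 'im',      # IcoMoon
--         'Bi': 'bi',      # BoxIcons
--         'Cg': 'cg',      # css.gg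
--         'Vsc': 'vsc',    # VS Code
--         'Tb': 'tb',      # Tabler
--         'Tfi': 'tfi',    # Themify
--         'Rx': 'rx',      # Radix
--         'Pi': 'pi',      # Phosphor
--         'Lia': 'lia',    # Icons8 Line Awesome
--         'Lu': 'lu',      # Lucide
--         'Ci': 'ci',      # Circum Icons
--     }
--
--     # Try exact prefix match (longest first)
--     for prefix in sorted(prefix_map.keys(), key=len, reverse=True):
--         if icon_name.startswith(prefix):
--             return prefix_map[prefix]
--
--     # Fallback: try lowercase first 2 chars
--     if len(icon_name) >= 2:
--         return icon_name[:2].lower()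
--
--     return None
-- ===== SOURCE B (Python) =====
-- def _infer_library(icon_name: str) -> str | None:
--     # Every mapped value is just its prefix lowercased, and each 2-char prefix's
--     # value coincides with the lowercase-first-2-chars fallback, so no table of
--     # values is needed: only the five 3-char prefixes must be recognised.
--     head = icon_name[:3]
--     if head in ('Io5', 'Hi2', 'Vsc', 'Tfi', 'Lia'):
--         return head.lower()
--     if len(icon_name) >= 2:
--         return icon_name[:2].lower()
--     return None
-- ===== Notes on version B (the rewrite author's own statement) =====
-- stated objective: simpler
-- what changed: Drops the prefix->value dict and the per-call sort/startswith scan entirely: since every mapped value equals its prefix lowercased and every 2-char prefix value coincides with the lowercase-first-two-chars fallback, B only checks the 3-char head against the five 3-char prefixes and otherwise lowercases the first two characters.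
import Mathlib
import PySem

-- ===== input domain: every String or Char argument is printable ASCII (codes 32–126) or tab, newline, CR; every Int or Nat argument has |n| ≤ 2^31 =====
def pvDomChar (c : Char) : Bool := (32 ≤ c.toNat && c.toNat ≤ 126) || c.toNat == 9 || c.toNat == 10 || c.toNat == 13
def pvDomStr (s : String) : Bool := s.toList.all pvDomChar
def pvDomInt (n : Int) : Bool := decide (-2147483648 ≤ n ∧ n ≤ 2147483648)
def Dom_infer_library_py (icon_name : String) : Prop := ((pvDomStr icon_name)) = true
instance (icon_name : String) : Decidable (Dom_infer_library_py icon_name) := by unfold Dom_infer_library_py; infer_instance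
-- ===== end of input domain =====

-- B drops A's dict and sorted longest-first startswith scan: every mapped value is its
-- prefix lowercased, so B only recognises the five 3-char prefixes and otherwise
-- lowercases the first two characters (objective: simpler).

-- ===== PORT A =====
-- the dict literal 'prefix_map', in insertion order
def pvPrefixMap_infer : PySem.Dict String String :=
  PySem.Dict.mk [("Fa","fa"),("Md","md"),("Io","io"),("Io5","io5"),("Ti","ti"),("Go","go"),("Fi","fi"),("Gi","gi"),("Wi","wi"),("Di","di"),("Ai","ai"),("Bs","bs"),("Ri","ri"),("Fc","fc"),("Gr","gr"),("Hi","hi"),("Hi2","hi2"),("Si","si"),("Sl","sl"),("Im","im"),("Bi","bi"),("Cg","cg"),("Vsc","vsc"),("Tb","tb"),("Tfi","tfi"),("Rx","rx"),("Pi","pi"),("Lia","lia"),("Lu","lu"),("Ci","ci")]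

-- 'for prefix in sorted(…): if icon_name.startswith(prefix): return prefix_map[prefix]'
def pvScan_infer (icon_name : String) : List String → Option String
  | [] => none
  | p :: rest =>
    if PySem.Str.startswith icon_name p then pvPrefixMap_infer.get? p
    else pvScan_infer icon_name rest

def infer_library_py (icon_name : String) : Option String :=
  match pvScan_infer icon_name
      (PySem.List.sorted pvPrefixMap_infer.keys PySem.Str.len true) with
  | some v => some v
  | none =>
    if 2 ≤ PySem.Str.len icon_name then
      some (PySem.Str.lower (PySem.Str.slice icon_name none (some 2)))
    else none

-- ===== PORT B =====
-- the tuple ('Io5', 'Hi2', 'Vsc', 'Tfi', 'Lia')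
def pvThreeTuple_infer : List String := ["Io5", "Hi2", "Vsc", "Tfi", "Lia"]

def infer_library_py_alt (icon_name : String) : Option String :=
  let head := PySem.Str.slice icon_name none (some 3)
  if head ∈ pvThreeTuple_infer then
    some (PySem.Str.lower head)
  else if 2 ≤ PySem.Str.len icon_name then
    some (PySem.Str.lower (PySem.Str.slice icon_name none (some 2)))
  else none

-- ===== PRECONDITION & SPEC =====
def Spec_infer_library_py (icon_name : String) (out : Option String) : Prop := out = infer_library_py_alt icon_name
instance (icon_name : String) (out : Option String) : Decidable (Spec_infer_library_py icon_name out) := by unfold Spec_infer_library_py; infer_instance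

-- ===== CLAIM (what is proved, stated in full; the proofs are below) =====
def Claim_equal_infer_library_py : Prop := ∀ (icon_name : String), Dom_infer_library_py icon_name → Spec_infer_library_py icon_name (infer_library_py icon_name)

-- ===== LEMMAS AND PROOFS =====

-- sorted(prefix_map.keys(), key=len, reverse=True): the five 3-char prefixes first
-- (stable: insertion order kept within a length class), then the 2-char ones
set_option maxHeartbeats 8000000 in
theorem pvSortedKeys_infer :
    PySem.List.sorted pvPrefixMap_infer.keys PySem.Str.len true = ["Io5","Hi2","Vsc","Tfi","Lia","Fa","Md","Io","Ti","Go","Fi","Gi","Wi","Di","Ai","Bs","Ri","Fc","Gr","Hi","Si","Sl","Im","Bi","Cg","Tb","Rx","Pi","Lu","Ci"] := by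
  decide

-- icon_name.startswith(p) for a prefix of known length n is a slice comparison
theorem pvSw_infer (s p : String) (n : Int) (hn : 0 ≤ n) (h : p.toList.length = n.toNat) :
    PySem.Str.startswith s p = (p == PySem.Str.slice s none (some n)) := by
  rw [Bool.eq_iff_iff]
  simp only [PySem.Str.startswith_eq, beq_iff_eq]
  rw [PySem.Chars.startswith_iff]
  have hsl : (PySem.Str.slice s none (some n)).toList = s.toList.take n.toNat := by
    simp only [PySem.Str.toList_slice, PySem.Chars.slice_eq_listSlice,
      PySem.List.slice_to s.toList hn]
  rw [List.prefix_iff_eq_take, h, ← String.toList_inj, hsl]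

theorem pvSw3_infer (s p : String) (h : p.toList.length = 3) :
    PySem.Str.startswith s p = (p == PySem.Str.slice s none (some 3)) :=
  pvSw_infer s p 3 (by decide) h

theorem pvSw2_infer (s p : String) (h : p.toList.length = 2) :
    PySem.Str.startswith s p = (p == PySem.Str.slice s none (some 2)) :=
  pvSw_infer s p 2 (by decide) h

-- one step of the scan loop
theorem pvScan_cons (s p : String) (rest : List String) :
    pvScan_infer s (p :: rest)
      = if PySem.Str.startswith s p then pvPrefixMap_infer.get? p
        else pvScan_infer s rest := rfl

-- a 2-char slice equal to a 2-char string forces len(s) >= 2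
theorem pvLen2_infer (s p : String) (hl : p.toList.length = 2)
    (hp : PySem.Str.slice s none (some 2) = p) : 2 <= PySem.Str.len s := by
  have hsl : (PySem.Str.slice s none (some 2)).toList = s.toList.take 2 := by
    simp only [PySem.Str.toList_slice, PySem.Chars.slice_eq_listSlice,
      PySem.List.slice_to s.toList (by norm_num : (0:Int) <= 2)]
    rfl
  have hln : (s.toList.take 2).length = 2 := by rw [<- hsl, hp]; exact hl
  rw [List.length_take] at hln
  rw [PySem.Str.len_eq]
  omega

-- the scan over the 2-char prefixes (each mapping to its own lowercase) is
-- absorbed by the lowercase-first-2-chars fallback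
theorem pvScan2_infer (s : String) (ps : List String)
    (h : forall p, p ∈ ps -> p.toList.length = 2 ∧ pvPrefixMap_infer.get? p = some (PySem.Str.lower p)) :
    (match pvScan_infer s ps with
     | some v => some v
     | none => if 2 <= PySem.Str.len s then some (PySem.Str.lower (PySem.Str.slice s none (some 2))) else none)
    = (if 2 <= PySem.Str.len s then some (PySem.Str.lower (PySem.Str.slice s none (some 2))) else none) := by
  induction ps with
  | nil => simp [pvScan_infer]
  | cons p rest ih =>
    obtain ⟨hl, hg⟩ := h p (List.mem_cons_self)
    by_cases hs : PySem.Str.startswith s p = true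
    · have hp : PySem.Str.slice s none (some 2) = p := by
        rw [pvSw2_infer s p hl] at hs; exact (beq_iff_eq.mp hs).symm
      have h2 : 2 <= PySem.Str.len s := pvLen2_infer s p hl hp
      simp only [pvScan_cons, if_pos hs, hg, if_pos h2, hp]
    · rw [pvScan_cons, if_neg hs]
      exact ih (fun q hq => h q (List.mem_cons_of_mem _ hq))

-- a hit on a 3-char prefix of the tuple: B returns the dict's value for it
theorem pvHit3_infer (s p : String) (hl : p.toList.length = 3)
    (hmem : p ∈ pvThreeTuple_infer)
    (hg : pvPrefixMap_infer.get? p = some (PySem.Str.lower p))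
    (hs : PySem.Str.startswith s p = true) :
    infer_library_py_alt s = pvPrefixMap_infer.get? p := by
  have hp : PySem.Str.slice s none (some 3) = p := by
    rw [pvSw3_infer s p hl] at hs; exact (beq_iff_eq.mp hs).symm
  simp only [infer_library_py_alt, hp, if_pos hmem, hg]

-- a miss: startswith false rules the slice out of the tuple
theorem pvNe3_infer (s p : String) (hl : p.toList.length = 3)
    (hf : ¬ PySem.Str.startswith s p = true) :
    PySem.Str.slice s none (some 3) ≠ p := by
  intro he
  rw [pvSw3_infer s p hl, he] at hf
  exact hf (beq_self_eq_true p)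

-- ===== VERDICT (by name: the statement is the Claim_ definition above) =====
set_option maxHeartbeats 4000000 in
theorem infer_library_py_spec : Claim_equal_infer_library_py := by
  intro s _
  unfold Spec_infer_library_py
  unfold infer_library_py
  rw [pvSortedKeys_infer]
  by_cases h0 : PySem.Str.startswith s "Io5" = true
  · rw [pvHit3_infer s "Io5" (by decide) (by decide) (by decide) h0, pvScan_cons, if_pos h0]
    rfl
  rw [pvScan_cons, if_neg h0]
  by_cases h1 : PySem.Str.startswith s "Hi2" = true
  · rw [pvHit3_infer s "Hi2" (by decide) (by decide) (by decide) h1, pvScan_cons, if_pos h1]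
    rfl
  rw [pvScan_cons, if_neg h1]
  by_cases h2 : PySem.Str.startswith s "Vsc" = true
  · rw [pvHit3_infer s "Vsc" (by decide) (by decide) (by decide) h2, pvScan_cons, if_pos h2]
    rfl
  rw [pvScan_cons, if_neg h2]
  by_cases h3 : PySem.Str.startswith s "Tfi" = true
  · rw [pvHit3_infer s "Tfi" (by decide) (by decide) (by decide) h3, pvScan_cons, if_pos h3]
    rfl
  rw [pvScan_cons, if_neg h3]
  by_cases h4 : PySem.Str.startswith s "Lia" = true
  · rw [pvHit3_infer s "Lia" (by decide) (by decide) (by decide) h4, pvScan_cons, if_pos h4]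
    rfl
  rw [pvScan_cons, if_neg h4]
  -- none of the five 3-char prefixes matches: B's tuple test fails
  have hc : ¬ PySem.Str.slice s none (some 3) ∈ pvThreeTuple_infer := by
    intro hm
    simp only [pvThreeTuple_infer, List.mem_cons, List.not_mem_nil, or_false] at hm
    rcases hm with he | he | he | he | he
    · exact pvNe3_infer s "Io5" (by decide) h0 he
    · exact pvNe3_infer s "Hi2" (by decide) h1 he
    · exact pvNe3_infer s "Vsc" (by decide) h2 he
    · exact pvNe3_infer s "Tfi" (by decide) h3 he
    · exact pvNe3_infer s "Lia" (by decide) h4 he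
  have hB : infer_library_py_alt s
      = (if 2 <= PySem.Str.len s then some (PySem.Str.lower (PySem.Str.slice s none (some 2))) else none) := by
    simp only [infer_library_py_alt, if_neg hc]
  rw [hB]
  exact pvScan2_infer s
    ["Fa","Md","Io","Ti","Go","Fi","Gi","Wi","Di","Ai","Bs","Ri","Fc","Gr","Hi","Si","Sl","Im","Bi","Cg","Tb","Rx","Pi","Lu","Ci"]
    (by decide)
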